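-- pv_equiv track=rewrite | github.com/BogdanovychA/karatel-game | karatel/logic/next_number.py | arithmetic_plus_sequence
-- ===== SOURCE A (Python) =====
-- def arithmetic_plus_sequence(
--     start: int, step: int, multiplier: int, length: int
-- ) -> tuple[int, ...]:
--     """Арифметична послідовність зі збільшенням кроку"""
--     if length <= 0:
--         raise ValueError("length має бути > 0")
--     sequence = [start]
--     for i in range(length - 1):
--         sequence.append(start := start + step)
--         step += multiplier
--
--     return tuple(sequence)
-- ===== SOURCE B (Python) =====
-- def arithmetic_plus_sequence(
--     start: int, step: int, multiplier: int, length: int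
-- ) -> tuple[int, ...]:
--     """Арифметична послідовність зі збільшенням кроку"""
--     if length <= 0:
--         raise ValueError("length має бути > 0")
--     return tuple(
--         start + i * step + multiplier * (i * (i - 1) // 2) for i in range(length)
--     )
-- ===== Notes on version B (the rewrite author's own statement) =====
-- stated objective: alternative
-- what changed: Replaces the stateful loop that mutates start and step with an independent closed-form per-index formula start + i*step + multiplier*(i*(i-1)//2).
import Mathlib
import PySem

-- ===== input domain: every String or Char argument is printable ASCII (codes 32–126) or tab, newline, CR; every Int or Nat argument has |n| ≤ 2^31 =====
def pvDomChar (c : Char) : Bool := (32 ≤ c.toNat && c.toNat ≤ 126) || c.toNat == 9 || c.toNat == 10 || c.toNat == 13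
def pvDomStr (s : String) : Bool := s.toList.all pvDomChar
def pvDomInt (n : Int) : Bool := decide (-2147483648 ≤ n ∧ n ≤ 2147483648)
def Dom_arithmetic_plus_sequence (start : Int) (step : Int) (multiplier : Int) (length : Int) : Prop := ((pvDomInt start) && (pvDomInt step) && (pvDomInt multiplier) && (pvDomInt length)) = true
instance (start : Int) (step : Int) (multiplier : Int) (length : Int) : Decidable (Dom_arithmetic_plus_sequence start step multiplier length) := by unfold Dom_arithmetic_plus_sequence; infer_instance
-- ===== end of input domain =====

-- ===== PORT A =====
-- One honest line: B computes each element by the closed form start + i*step + multiplier*(i*(i-1)//2)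
-- instead of A's stateful loop mutating start and step (alternative decomposition, same cost).
-- Loop body of A: each iteration appends (start := start + step) and then does step += multiplier.
def pvALoop (start step multiplier : Int) : Nat → List Int
  | 0 => []
  | n + 1 => (start + step) :: pvALoop (start + step) (step + multiplier) multiplier n

def arithmetic_plus_sequence (start : Int) (step : Int) (multiplier : Int) (length : Int) : List Int :=
  if length ≤ 0 then []  -- Python raises ValueError here; excluded by Pre_
  else start :: pvALoop start step multiplier (length - 1).toNat

-- ===== PORT B =====
def arithmetic_plus_sequence_alt (start : Int) (step : Int) (multiplier : Int) (length : Int) : List Int :=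
  if length ≤ 0 then []  -- Python raises ValueError here; excluded by Pre_
  else (PySem.List.pyRange 0 length 1).map
    (fun i => start + i * step + multiplier * PySem.Int.floordiv (i * (i - 1)) 2)

-- ===== PRECONDITION & SPEC =====
-- Pre_ excludes exactly length <= 0, where the Python A (and B) raise ValueError.
def Pre_arithmetic_plus_sequence (start : Int) (step : Int) (multiplier : Int) (length : Int) : Prop := 1 ≤ length
instance (start : Int) (step : Int) (multiplier : Int) (length : Int) : Decidable (Pre_arithmetic_plus_sequence start step multiplier length) := by unfold Pre_arithmetic_plus_sequence; infer_instance
def pvWitness_arithmetic_plus_sequence : Int × Int × Int × Int := (3, 2, 1, 5)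
def Spec_arithmetic_plus_sequence (start : Int) (step : Int) (multiplier : Int) (length : Int) (out : List Int) : Prop := out = arithmetic_plus_sequence_alt start step multiplier length
instance (start : Int) (step : Int) (multiplier : Int) (length : Int) (out : List Int) : Decidable (Spec_arithmetic_plus_sequence start step multiplier length out) := by unfold Spec_arithmetic_plus_sequence; infer_instance

-- ===== CLAIM (what is proved, stated in full; the proofs are below) =====
def Claim_equal_arithmetic_plus_sequence : Prop := ∀ (start : Int) (step : Int) (multiplier : Int) (length : Int), Dom_arithmetic_plus_sequence start step multiplier length → Pre_arithmetic_plus_sequence start step multiplier length → Spec_arithmetic_plus_sequence start step multiplier length (arithmetic_plus_sequence start step multiplier length)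

-- ===== LEMMAS AND PROOFS =====

-- triangular-number step: (j+1)*j//2 gains j when j grows by one (for j = i+1, i : Nat cast)
lemma pv_tri_succ (i : Nat) :
    PySem.Int.floordiv (((i:Int) + 2) * ((i:Int) + 1)) 2
      = PySem.Int.floordiv (((i:Int) + 1) * (i:Int)) 2 + ((i:Int) + 1) := by
  rw [PySem.Int.floordiv_eq_ediv_of_pos (by norm_num),
      PySem.Int.floordiv_eq_ediv_of_pos (by norm_num)]
  have h : ((i:Int) + 2) * ((i:Int) + 1) = ((i:Int) + 1) * (i:Int) + 2 * ((i:Int) + 1) := by ring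
  omega

-- the loop produces, from state (s, t), the closed-form elements for indices 1..n
lemma pvALoop_eq (n : Nat) : ∀ (s t m : Int),
    pvALoop s t m n = (List.range n).map
      (fun (i : Nat) => s + ((i:Int) + 1) * t + m * PySem.Int.floordiv (((i:Int) + 1) * (i:Int)) 2) := by
  induction n with
  | zero => intro s t m; rfl
  | succ n ih =>
    intro s t m
    rw [List.range_succ_eq_map, List.map_cons, List.map_map]
    show (s + t) :: pvALoop (s + t) (t + m) m n = _
    rw [ih (s + t) (t + m) m]
    refine List.cons_eq_cons.mpr ⟨?_, ?_⟩
    · simp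
    · apply List.map_congr_left
      intro i _
      simp only [Function.comp, Nat.succ_eq_add_one]
      push_cast
      rw [show ((i:Int) + 1 + 1) = ((i:Int) + 2) by ring, pv_tri_succ i]
      ring

-- ===== VERDICT (by name: the statement is the Claim_ definition above) =====
theorem arithmetic_plus_sequence_spec : Claim_equal_arithmetic_plus_sequence := by
  intro s t m len _ hpre
  unfold Spec_arithmetic_plus_sequence arithmetic_plus_sequence arithmetic_plus_sequence_alt
  have hlen : ¬ len ≤ 0 := by unfold Pre_arithmetic_plus_sequence at hpre; omega
  rw [if_neg hlen, if_neg hlen, PySem.List.pyRange_one]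
  have hk : (len - 0).toNat = (len - 1).toNat + 1 := by omega
  rw [hk, List.range_succ_eq_map, List.map_cons, List.map_map, pvALoop_eq]
  refine List.cons_eq_cons.mpr ⟨?_, ?_⟩
  · simp
  · rw [List.map_map]
    apply List.map_congr_left
    intro i _
    simp only [Function.comp, Nat.succ_eq_add_one]
    push_cast
    ring_nf
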